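-- pv_equiv track=rewrite | github.com/bejeri4/Algo | SortedPermutationRank.py | indexOfSymbol
-- ===== SOURCE A (Python) =====
-- def indexOfSymbol(arr, symbol):
--     i = 0
--     j = len(arr) - 1
--     while i <= j:
--         mid = i + (j - i) // 2
--         if arr[mid] == symbol:
--             arr.pop(mid)
--             return mid
--         elif symbol < arr[mid]:
--             j = mid - 1
--         else:
--             i = mid + 1
--     return -1
-- ===== SOURCE B (Python) =====
-- def indexOfSymbol(arr, symbol):
--     def go(seg, base):
--         if not seg:
--             return -1
--         m = (len(seg) - 1) // 2
--         v = seg[m]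
--         if v == symbol:
--             return base + m
--         if symbol < v:
--             return go(seg[:m], base)
--         return go(seg[m + 1:], base + m + 1)
--     r = go(arr, 0)
--     if r != -1:
--         arr.pop(r)
--     return r
-- ===== Notes on version B (the rewrite author's own statement) =====
-- stated objective: alternative
-- what changed: A's index-pair while-loop binary search is replaced by a structural recursion on list slices: go(seg, base) halves the actual sublist and carries an offset accumulator, with the single pop done once at the end from the returned index; same probe values, so identical results and mutation.
import Mathlib
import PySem

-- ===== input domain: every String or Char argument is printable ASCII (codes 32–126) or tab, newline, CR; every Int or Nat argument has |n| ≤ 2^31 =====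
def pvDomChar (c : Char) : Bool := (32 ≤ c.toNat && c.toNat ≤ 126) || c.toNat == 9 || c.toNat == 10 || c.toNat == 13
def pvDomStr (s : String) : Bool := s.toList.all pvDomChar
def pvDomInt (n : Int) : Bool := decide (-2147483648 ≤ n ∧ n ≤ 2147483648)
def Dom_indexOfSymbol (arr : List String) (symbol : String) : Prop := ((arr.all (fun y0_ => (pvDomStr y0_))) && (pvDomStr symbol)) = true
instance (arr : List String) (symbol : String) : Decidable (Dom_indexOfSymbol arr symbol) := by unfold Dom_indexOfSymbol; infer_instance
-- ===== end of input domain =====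

-- B replaces A's index-pair while loop by a structural recursion on list slices with an
-- offset accumulator (objective: alternative decomposition). Both Pythons pop the found
-- element from arr in place; the equivalence proved here is about the RETURN value.

-- ===== PORT A =====
-- termination facts for the two ports, cited by name in decreasing_by
theorem indexOfSymbolLoop_dec_left (i j : Int) (hij : i ≤ j) :
    (i + PySem.Int.floordiv (j - i) 2 - 1 + 1 - i).toNat < (j + 1 - i).toNat := by
  rw [PySem.Int.floordiv_eq_ediv_of_pos (by omega : (0:Int) < 2)]
  omega

theorem indexOfSymbolLoop_dec_right (i j : Int) (hij : i ≤ j) :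
    (j + 1 - (i + PySem.Int.floordiv (j - i) 2 + 1)).toNat < (j + 1 - i).toNat := by
  rw [PySem.Int.floordiv_eq_ediv_of_pos (by omega : (0:Int) < 2)]
  omega

theorem indexOfSymbolGo_dec_left (seg : List String) (hne : ¬ seg = []) :
    (PySem.List.slice seg none (some (PySem.Int.floordiv ((seg.length : Int) - 1) 2))).length
      < seg.length := by
  have hlen : 0 < seg.length := List.length_pos_iff.mpr hne
  have h2 : PySem.Int.floordiv ((seg.length : Int) - 1) 2 = ((seg.length : Int) - 1) / 2 :=
    PySem.Int.floordiv_eq_ediv_of_pos (by omega)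
  rw [h2, PySem.List.slice_to seg (by omega)]
  simp only [List.length_take]
  omega

theorem indexOfSymbolGo_dec_right (seg : List String) (hne : ¬ seg = []) :
    (PySem.List.slice seg (some (PySem.Int.floordiv ((seg.length : Int) - 1) 2 + 1)) none).length
      < seg.length := by
  have hlen : 0 < seg.length := List.length_pos_iff.mpr hne
  have h2 : PySem.Int.floordiv ((seg.length : Int) - 1) 2 = ((seg.length : Int) - 1) / 2 :=
    PySem.Int.floordiv_eq_ediv_of_pos (by omega)
  rw [h2, PySem.List.slice_from seg (by omega)]
  simp only [List.length_drop]
  omega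

-- A's while-loop, as a recursion over the mutable state (i, j).
def indexOfSymbolLoop (arr : List String) (symbol : String) (i j : Int) : Int :=
  if hij : i ≤ j then
    let mid := i + PySem.Int.floordiv (j - i) 2
    match PySem.List.pyGet? arr mid with
    | none => -1  -- unreachable from the entry call: there 0 ≤ i ≤ mid ≤ j < arr.length
    | some x =>
      if x = symbol then mid
      else if symbol < x then indexOfSymbolLoop arr symbol i (mid - 1)
      else indexOfSymbolLoop arr symbol (mid + 1) j
  else -1
termination_by (j + 1 - i).toNat
decreasing_by
  · exact indexOfSymbolLoop_dec_left i j hij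
  · exact indexOfSymbolLoop_dec_right i j hij

def indexOfSymbol (arr : List String) (symbol : String) : Int :=
  indexOfSymbolLoop arr symbol 0 ((arr.length : Int) - 1)

-- ===== PORT B =====
-- B's helper go(seg, base): recursion on the sublist seg itself, base = offset of seg in arr.
def indexOfSymbolGo (symbol : String) (seg : List String) (base : Int) : Int :=
  if hne : seg = [] then -1
  else
    let m : Int := PySem.Int.floordiv ((seg.length : Int) - 1) 2
    match PySem.List.pyGet? seg m with
    | none => -1  -- unreachable: 0 ≤ m < seg.length
    | some v =>
      if v = symbol then base + m
      else if symbol < v then indexOfSymbolGo symbol (PySem.List.slice seg none (some m)) base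
      else indexOfSymbolGo symbol (PySem.List.slice seg (some (m + 1)) none) (base + m + 1)
termination_by seg.length
decreasing_by
  · exact indexOfSymbolGo_dec_left seg hne
  · exact indexOfSymbolGo_dec_right seg hne

-- Source B's go never mutates (slices copy); the final arr.pop(r) is a side effect only and
-- does not change the returned value.
def indexOfSymbol_alt (arr : List String) (symbol : String) : Int :=
  indexOfSymbolGo symbol arr 0

-- ===== PRECONDITION & SPEC =====
def Spec_indexOfSymbol (arr : List String) (symbol : String) (out : Int) : Prop := out = indexOfSymbol_alt arr symbol
instance (arr : List String) (symbol : String) (out : Int) : Decidable (Spec_indexOfSymbol arr symbol out) := by unfold Spec_indexOfSymbol; infer_instance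

-- ===== CLAIM (what is proved, stated in full; the proofs are below) =====
def Claim_equal_indexOfSymbol : Prop := ∀ (arr : List String) (symbol : String), Dom_indexOfSymbol arr symbol → Spec_indexOfSymbol arr symbol (indexOfSymbol arr symbol)

-- ===== LEMMAS AND PROOFS =====
-- Invariant: the loop on (i, j) equals go on the sublist arr[i .. j] with base i.
theorem loop_eq_go (arr : List String) (symbol : String) (i j : Int) :
    0 ≤ i → j < (arr.length : Int) →
    indexOfSymbolLoop arr symbol i j
      = indexOfSymbolGo symbol (List.take ((j + 1 - i).toNat) (List.drop i.toNat arr)) i := by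
  fun_induction indexOfSymbolLoop arr symbol i j with
  | case1 i j hij mid hget =>
    intro hi hj
    exfalso
    have hd : mid = i + (j - i) / 2 := by
      show i + PySem.Int.floordiv (j - i) 2 = _
      rw [PySem.Int.floordiv_eq_ediv_of_pos (by omega : (0:Int) < 2)]
    have hnr : ¬ PySem.Raise.InRange arr.length mid := (PySem.List.pyGet?_eq_none_iff _ _).mp hget
    rw [hd] at hnr
    unfold PySem.Raise.InRange at hnr
    omega
  | case2 i j hij mid hget =>
    intro hi hj
    have hd : mid = i + (j - i) / 2 := by
      show i + PySem.Int.floordiv (j - i) 2 = _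
      rw [PySem.Int.floordiv_eq_ediv_of_pos (by omega : (0:Int) < 2)]
    set seg := List.take ((j + 1 - i).toNat) (List.drop i.toNat arr) with hsegdef
    have hseglen : (seg.length : Int) = j + 1 - i := by
      simp [hsegdef]; omega
    have hne : seg ≠ [] := by
      intro h; rw [h] at hseglen; simp at hseglen; omega
    have hm : PySem.Int.floordiv ((seg.length : Int) - 1) 2 = mid - i := by
      rw [hseglen, PySem.Int.floordiv_eq_ediv_of_pos (by omega : (0:Int) < 2), hd]
      omega
    have hget' : PySem.List.pyGet? seg (mid - i) = some symbol := by
      rw [PySem.List.pyGet?_of_nonneg seg (by rw [hd]; omega), hsegdef,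
        List.getElem?_take_of_lt (by simp only [hd]; omega), List.getElem?_drop]
      rw [show i.toNat + (mid - i).toNat = mid.toNat by simp only [hd]; omega]
      rw [PySem.List.pyGet?_of_nonneg arr (by rw [hd]; omega)] at hget
      exact hget
    rw [indexOfSymbolGo]
    simp only [dif_neg hne, hm, hget']
    simp
  | case3 i j hij mid x hget heq hlt ih =>
    intro hi hj
    have hd : mid = i + (j - i) / 2 := by
      show i + PySem.Int.floordiv (j - i) 2 = _
      rw [PySem.Int.floordiv_eq_ediv_of_pos (by omega : (0:Int) < 2)]
    set seg := List.take ((j + 1 - i).toNat) (List.drop i.toNat arr) with hsegdef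
    have hseglen : (seg.length : Int) = j + 1 - i := by
      simp [hsegdef]; omega
    have hne : seg ≠ [] := by
      intro h; rw [h] at hseglen; simp at hseglen; omega
    have hm : PySem.Int.floordiv ((seg.length : Int) - 1) 2 = mid - i := by
      rw [hseglen, PySem.Int.floordiv_eq_ediv_of_pos (by omega : (0:Int) < 2), hd]
      omega
    have hget' : PySem.List.pyGet? seg (mid - i) = some x := by
      rw [PySem.List.pyGet?_of_nonneg seg (by rw [hd]; omega), hsegdef,
        List.getElem?_take_of_lt (by simp only [hd]; omega), List.getElem?_drop]
      rw [show i.toNat + (mid - i).toNat = mid.toNat by simp only [hd]; omega]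
      rw [PySem.List.pyGet?_of_nonneg arr (by rw [hd]; omega)] at hget
      exact hget
    rw [indexOfSymbolGo]
    simp only [dif_neg hne, hm, hget']
    rw [if_neg heq, if_pos hlt]
    rw [PySem.List.slice_to seg (by simp only [hd]; omega)]
    have hsub : seg.take (mid - i).toNat
        = List.take ((mid - 1 + 1 - i).toNat) (List.drop i.toNat arr) := by
      rw [hsegdef, List.take_take]
      congr 1
      simp only [hd]; omega
    rw [hsub]
    exact ih hi (by simp only [hd]; omega)
  | case4 i j hij mid x hget heq hlt ih =>
    intro hi hj
    have hd : mid = i + (j - i) / 2 := by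
      show i + PySem.Int.floordiv (j - i) 2 = _
      rw [PySem.Int.floordiv_eq_ediv_of_pos (by omega : (0:Int) < 2)]
    set seg := List.take ((j + 1 - i).toNat) (List.drop i.toNat arr) with hsegdef
    have hseglen : (seg.length : Int) = j + 1 - i := by
      simp [hsegdef]; omega
    have hne : seg ≠ [] := by
      intro h; rw [h] at hseglen; simp at hseglen; omega
    have hm : PySem.Int.floordiv ((seg.length : Int) - 1) 2 = mid - i := by
      rw [hseglen, PySem.Int.floordiv_eq_ediv_of_pos (by omega : (0:Int) < 2), hd]
      omega
    have hget' : PySem.List.pyGet? seg (mid - i) = some x := by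
      rw [PySem.List.pyGet?_of_nonneg seg (by rw [hd]; omega), hsegdef,
        List.getElem?_take_of_lt (by simp only [hd]; omega), List.getElem?_drop]
      rw [show i.toNat + (mid - i).toNat = mid.toNat by simp only [hd]; omega]
      rw [PySem.List.pyGet?_of_nonneg arr (by rw [hd]; omega)] at hget
      exact hget
    rw [indexOfSymbolGo]
    simp only [dif_neg hne, hm, hget']
    rw [if_neg heq, if_neg hlt]
    rw [PySem.List.slice_from seg (by simp only [hd]; omega)]
    have hsub : seg.drop (mid - i + 1).toNat
        = List.take ((j + 1 - (mid + 1)).toNat) (List.drop (mid + 1).toNat arr) := by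
      rw [hsegdef, List.drop_take, List.drop_drop]
      rw [show i.toNat + (mid - i + 1).toNat = (mid + 1).toNat by simp only [hd]; omega]
      congr 1
      simp only [hd]; omega
    rw [hsub, show i + (mid - i) + 1 = mid + 1 by ring]
    exact ih (by simp only [hd]; omega) hj
  | case5 i j hij =>
    intro hi hj
    have : (j + 1 - i).toNat = 0 := by omega
    rw [this, List.take_zero, indexOfSymbolGo]
    simp

-- ===== VERDICT (by name: the statement is the Claim_ definition above) =====
theorem indexOfSymbol_spec : Claim_equal_indexOfSymbol := by
  intro arr symbol _
  unfold Spec_indexOfSymbol indexOfSymbol indexOfSymbol_alt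
  rcases arr with _ | ⟨a, t⟩
  · rw [indexOfSymbolLoop, indexOfSymbolGo]
    simp
  · rw [loop_eq_go _ _ 0 _ (by omega) (by simp)]
    congr 1
    simp
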